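-- pv_equiv track=rewrite | github.com/shivani-cloudextend/ai-org-assistant | data_collectors.py | determine_issue_role_tags
-- ===== SOURCE A (Python) =====
-- from typing import List, Dict, AsyncGenerator, Optional
--
-- def determine_issue_role_tags(labels: List[Dict]) -> List[str]:
--     """Determine role tags based on GitHub issue labels"""
--     label_names = [label['name'].lower() for label in labels]
--
--     role_tags = []
--
--     # Developer-focused labels
--     dev_labels = ['bug', 'enhancement', 'feature', 'technical-debt', 'architecture', 'performance']
--     if any(label in label_names for label in dev_labels):
--         role_tags.append('developer')
--
--     # Support-focused labels
--     support_labels = ['support', 'question', 'help-wanted', 'documentation', 'user-experience']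
--     if any(label in label_names for label in support_labels):
--         role_tags.append('support')
--
--     # Default to both if no specific labels
--     if not role_tags:
--         role_tags = ['developer', 'support']
--
--     return role_tags
-- ===== SOURCE B (Python) =====
-- _ROLE_BY_KEYWORD = {
--     'bug': 'developer', 'enhancement': 'developer', 'feature': 'developer',
--     'technical-debt': 'developer', 'architecture': 'developer', 'performance': 'developer',
--     'support': 'support', 'question': 'support', 'help-wanted': 'support',
--     'documentation': 'support', 'user-experience': 'support',
-- }
--
-- def determine_issue_role_tags(labels):
--     """Determine role tags based on GitHub issue labels"""
--     found = set()
--     for label in labels: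
--         role = _ROLE_BY_KEYWORD.get(label['name'].lower())
--         if role is not None:
--             found.add(role)
--     tags = [r for r in ('developer', 'support') if r in found]
--     return tags if tags else ['developer', 'support']
-- ===== Notes on version B (the rewrite author's own statement) =====
-- stated objective: alternative
-- what changed: Replaces A's two keyword-list scans over the label-name list with one indexed pass over the labels using a keyword-to-role dict and a found-role set, emitting roles in fixed canonical order.
import Mathlib
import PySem

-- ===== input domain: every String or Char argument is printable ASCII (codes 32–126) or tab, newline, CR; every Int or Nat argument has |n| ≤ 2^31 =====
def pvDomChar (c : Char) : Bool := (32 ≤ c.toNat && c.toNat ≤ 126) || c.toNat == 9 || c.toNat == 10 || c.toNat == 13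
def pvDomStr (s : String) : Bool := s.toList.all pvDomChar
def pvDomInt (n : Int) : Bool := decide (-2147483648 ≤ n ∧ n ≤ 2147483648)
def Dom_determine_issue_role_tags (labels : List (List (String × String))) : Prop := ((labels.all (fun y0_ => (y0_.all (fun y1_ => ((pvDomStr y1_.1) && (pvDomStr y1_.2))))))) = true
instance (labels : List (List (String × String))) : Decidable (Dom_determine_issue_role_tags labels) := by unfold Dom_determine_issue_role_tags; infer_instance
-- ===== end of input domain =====

-- B replaces A's two keyword-list scans over the label names with one indexed pass
-- (keyword→role lookup table + found-role set), emitting roles in fixed canonical order.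

-- ===== PORT A =====
def pvDevLabels : List String :=
  ["bug", "enhancement", "feature", "technical-debt", "architecture", "performance"]

def pvSupportLabels : List String :=
  ["support", "question", "help-wanted", "documentation", "user-experience"]

def determine_issue_role_tags (labels : List (List (String × String))) : List String :=
  let label_names := labels.map (fun label => PySem.Str.lower ((List.lookup "name" label).getD ""))
  let role_tags : List String := []
  let role_tags := if pvDevLabels.any (fun label => label_names.contains label)
                   then role_tags ++ ["developer"] else role_tags
  let role_tags := if pvSupportLabels.any (fun label => label_names.contains label)
                   then role_tags ++ ["support"] else role_tags
  if role_tags = [] then ["developer", "support"] else role_tags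

-- ===== PORT B =====
def pvRoleByKeyword : List (String × String) :=
  [("bug", "developer"), ("enhancement", "developer"), ("feature", "developer"),
   ("technical-debt", "developer"), ("architecture", "developer"), ("performance", "developer"),
   ("support", "support"), ("question", "support"), ("help-wanted", "support"),
   ("documentation", "support"), ("user-experience", "support")]

def determine_issue_role_tags_alt (labels : List (List (String × String))) : List String :=
  let found : PySem.Set String := labels.foldl (fun s label =>
      (List.lookup (PySem.Str.lower ((List.lookup "name" label).getD "")) pvRoleByKeyword).elim
        s (fun r => PySem.Set.add s r)) PySem.Set.empty
  let tags := (["developer", "support"] : List String).filter (fun r => PySem.Set.contains found r)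
  if tags = [] then ["developer", "support"] else tags

-- ===== PRECONDITION & SPEC =====
-- Pre_ excludes exactly the labels missing the 'name' key, on which A raises KeyError.
def Pre_determine_issue_role_tags (labels : List (List (String × String))) : Prop :=
  labels.all (fun label => (List.lookup "name" label).isSome) = true
instance (labels : List (List (String × String))) : Decidable (Pre_determine_issue_role_tags labels) := by unfold Pre_determine_issue_role_tags; infer_instance

def pvWitness_determine_issue_role_tags : (List (List (String × String))) := [[("name", "Bug")], [("name", "question")]]

def Spec_determine_issue_role_tags (labels : List (List (String × String))) (out : List String) : Prop := out = determine_issue_role_tags_alt labels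
instance (labels : List (List (String × String))) (out : List String) : Decidable (Spec_determine_issue_role_tags labels out) := by unfold Spec_determine_issue_role_tags; infer_instance

-- ===== CLAIM (what is proved, stated in full; the proofs are below) =====
def Claim_equal_determine_issue_role_tags : Prop := ∀ (labels : List (List (String × String))), Dom_determine_issue_role_tags labels → Pre_determine_issue_role_tags labels → Spec_determine_issue_role_tags labels (determine_issue_role_tags labels)

-- ===== LEMMAS AND PROOFS =====

lemma lookup_kw_dev (n : String) :
    (List.lookup n pvRoleByKeyword = some "developer") ↔ n ∈ pvDevLabels := by
  simp only [pvRoleByKeyword, pvDevLabels, List.lookup, List.mem_cons, List.not_mem_nil]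
  repeat' split
  all_goals simp_all [beq_iff_eq]

lemma lookup_kw_sup (n : String) :
    (List.lookup n pvRoleByKeyword = some "support") ↔ n ∈ pvSupportLabels := by
  simp only [pvRoleByKeyword, pvSupportLabels, List.lookup, List.mem_cons, List.not_mem_nil]
  repeat' split
  all_goals simp_all [beq_iff_eq]

lemma mem_fold_roles (labels : List (List (String × String))) (s : PySem.Set String) (r : String) :
    r ∈ labels.foldl (fun s label =>
        (List.lookup (PySem.Str.lower ((List.lookup "name" label).getD "")) pvRoleByKeyword).elim
          s (fun v => PySem.Set.add s v)) s
    ↔ r ∈ s ∨ ∃ label ∈ labels,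
        List.lookup (PySem.Str.lower ((List.lookup "name" label).getD "")) pvRoleByKeyword = some r := by
  induction labels generalizing s with
  | nil => simp
  | cons l t ih =>
    simp only [List.foldl_cons, List.mem_cons]
    rcases h : List.lookup (PySem.Str.lower ((List.lookup "name" l).getD "")) pvRoleByKeyword with _ | v
    · simp only [Option.elim_none]
      rw [ih]
      simp [h]
    · simp only [Option.elim_some]
      rw [ih]
      simp only [PySem.Set.mem_add]
      constructor
      · rintro (⟨hs | rfl⟩ | ⟨lb, hlb, hv⟩)
        · exact Or.inl hs
        · exact Or.inr ⟨l, Or.inl rfl, h⟩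
        · exact Or.inr ⟨lb, Or.inr hlb, hv⟩
      · rintro (hs | ⟨lb, (rfl | hlb), hv⟩)
        · exact Or.inl (Or.inl hs)
        · exact Or.inl (Or.inr (Option.some.inj (h.symm.trans hv)).symm)
        · exact Or.inr ⟨lb, hlb, hv⟩

-- ===== VERDICT (by name: the statement is the Claim_ definition above) =====
theorem determine_issue_role_tags_spec : Claim_equal_determine_issue_role_tags := by
  intro labels _ _
  show determine_issue_role_tags labels = determine_issue_role_tags_alt labels
  unfold determine_issue_role_tags determine_issue_role_tags_alt
  have hAdev : (∃ x ∈ pvDevLabels, x ∈ labels.map (fun label => PySem.Str.lower ((List.lookup "name" label).getD "")))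
      ↔ (∃ label ∈ labels, PySem.Str.lower ((List.lookup "name" label).getD "") ∈ pvDevLabels) := by
    simp only [List.mem_map]
    constructor
    · rintro ⟨x, hx, l, hl, rfl⟩; exact ⟨l, hl, hx⟩
    · rintro ⟨l, hl, hx⟩; exact ⟨_, hx, l, hl, rfl⟩
  have hAsup : (∃ x ∈ pvSupportLabels, x ∈ labels.map (fun label => PySem.Str.lower ((List.lookup "name" label).getD "")))
      ↔ (∃ label ∈ labels, PySem.Str.lower ((List.lookup "name" label).getD "") ∈ pvSupportLabels) := by
    simp only [List.mem_map]
    constructor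
    · rintro ⟨x, hx, l, hl, rfl⟩; exact ⟨l, hl, hx⟩
    · rintro ⟨l, hl, hx⟩; exact ⟨_, hx, l, hl, rfl⟩
  have hBdev : ("developer" ∈ labels.foldl (fun s label =>
        (List.lookup (PySem.Str.lower ((List.lookup "name" label).getD "")) pvRoleByKeyword).elim
          s (fun v => PySem.Set.add s v)) PySem.Set.empty)
      ↔ (∃ label ∈ labels, PySem.Str.lower ((List.lookup "name" label).getD "") ∈ pvDevLabels) := by
    rw [mem_fold_roles]
    simp only [lookup_kw_dev, PySem.Set.empty]
    simp
  have hBsup : ("support" ∈ labels.foldl (fun s label =>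
        (List.lookup (PySem.Str.lower ((List.lookup "name" label).getD "")) pvRoleByKeyword).elim
          s (fun v => PySem.Set.add s v)) PySem.Set.empty)
      ↔ (∃ label ∈ labels, PySem.Str.lower ((List.lookup "name" label).getD "") ∈ pvSupportLabels) := by
    rw [mem_fold_roles]
    simp only [lookup_kw_sup, PySem.Set.empty]
    simp
  by_cases hd : ∃ label ∈ labels, PySem.Str.lower ((List.lookup "name" label).getD "") ∈ pvDevLabels <;>
    by_cases hs : ∃ label ∈ labels, PySem.Str.lower ((List.lookup "name" label).getD "") ∈ pvSupportLabels <;>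
    simp only [List.any_eq_true, List.contains_iff_mem, List.filter_cons, List.filter_nil,
          PySem.Set.contains, hAdev, hAsup, hBdev, hBsup] <;>
    simp [hd, hs]
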